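-- pv_equiv track=rewrite | github.com/inetuid/ndca | yandc/mikrotik.py | parse_as_key_value
-- ===== SOURCE A (Python) =====
-- def parse_as_key_value(kv_parts):
-- 	as_key_value = {}
--
-- 	last_key = None
-- 	for kv in kv_parts:
-- 		if kv.find('=') != -1:
-- 			k, v = kv.split('=', 1)
-- 			if k in as_key_value:
-- 				raise GeneralError('Key already seen - [{}]'.format(k))
-- 			as_key_value[k] = v
-- 			last_key = k
-- 		elif last_key is not None:
-- 			as_key_value[last_key] = ' '.join([as_key_value[last_key], kv])
-- 		else:
-- 			raise GeneralError(kv)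
--
-- 	return as_key_value
-- ===== SOURCE B (Python) =====
-- class GeneralError(Exception):
-- 	pass
--
-- def parse_as_key_value(kv_parts):
-- 	as_key_value = {}
-- 	i, n = 0, len(kv_parts)
-- 	while i < n:
-- 		kv = kv_parts[i]
-- 		if '=' not in kv:
-- 			raise GeneralError(kv)
-- 		k, v = kv.split('=', 1)
-- 		if k in as_key_value:
-- 			raise GeneralError('Key already seen - [{}]'.format(k))
-- 		i += 1
-- 		pieces = [v]
-- 		while i < n and '=' not in kv_parts[i]:
-- 			pieces.append(kv_parts[i])
-- 			i += 1
-- 		as_key_value[k] = ' '.join(pieces)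
-- 	return as_key_value
-- ===== Notes on version B (the rewrite author's own statement) =====
-- stated objective: alternative
-- what changed: B replaces A's flat loop with last_key state and incremental per-token ' '.join dict rewrites by a nested-loop run decomposition: each '='-token's continuation run is collected into a pieces list and joined once, so the dict is written once per key.
import Mathlib
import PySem

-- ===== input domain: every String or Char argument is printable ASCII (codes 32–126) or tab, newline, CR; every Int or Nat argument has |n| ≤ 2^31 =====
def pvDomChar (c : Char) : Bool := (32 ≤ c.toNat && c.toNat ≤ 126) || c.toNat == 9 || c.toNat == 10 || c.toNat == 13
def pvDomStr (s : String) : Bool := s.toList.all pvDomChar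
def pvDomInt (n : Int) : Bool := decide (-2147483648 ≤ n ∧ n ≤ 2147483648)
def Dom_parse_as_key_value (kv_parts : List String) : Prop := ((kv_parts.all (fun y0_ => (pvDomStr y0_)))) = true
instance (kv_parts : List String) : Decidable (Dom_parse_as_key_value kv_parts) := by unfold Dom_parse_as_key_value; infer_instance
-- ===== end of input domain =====

-- B replaces A's flat loop (last_key state, incremental ' '.join rewrites of the dict entry) by a
-- nested-loop run decomposition: collect each key's continuation run into a pieces list, join once.
-- Equivalence of the RETURN value on inputs where A returns (Pre_ excludes exactly A's raises).

-- ===== PORT A =====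
-- A's for-loop over kv_parts with state (dict, last_key); 'raise' is modelled as none.
def parseA_loop : List String → PySem.Dict String String → Option String → Option (PySem.Dict String String)
  | [], d, _ => some d
  | kv :: rest, d, lastKey =>
    if PySem.Str.find kv "=" ≠ -1 then
      match PySem.Str.splitMax? kv "=" 1 with
      | some [k, v] =>
        if d.contains k then none          -- raise GeneralError('Key already seen - …')
        else parseA_loop rest (d.insert k v) (some k)
      | _ => none                           -- unreachable: split('=',1) with '=' present gives 2 pieces
    else
      match lastKey with
      | some lk => parseA_loop rest (d.insert lk (PySem.Str.join " " [d.getD lk "", kv])) lastKey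
      | none => none                        -- raise GeneralError(kv)

def parse_as_key_value (kv_parts : List String) : List (String × String) :=
  match parseA_loop kv_parts PySem.Dict.empty none with
  | some d => d.items
  | none => []                              -- A raises here; excluded by Pre_

-- ===== PORT B =====
-- inner while loop of B: append tokens without '=' to pieces, stop at the first '=' token
def parseB_collect : List String → List String → (List String × List String)
  | [], pieces => (pieces, [])
  | s :: rest, pieces =>
    if PySem.Str.isIn "=" s then (pieces, s :: rest)
    else parseB_collect rest (pieces ++ [s])

-- termination helper for parseB_loop (cited by its decreasing_by)
theorem parseB_collect_snd_len : ∀ (l pieces : List String), (parseB_collect l pieces).2.length ≤ l.length := by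
  intro l
  induction l with
  | nil => intro pieces; simp [parseB_collect]
  | cons s rest ih =>
    intro pieces
    simp only [parseB_collect]
    split
    · simp
    · exact le_trans (ih _) (by simp)

-- outer while loop of B
def parseB_loop : List String → PySem.Dict String String → Option (PySem.Dict String String)
  | [], d => some d
  | kv :: rest, d =>
    if PySem.Str.isIn "=" kv then
      match PySem.Str.splitMax? kv "=" 1 with
      | some [k, v] =>
        if d.contains k then none          -- raise GeneralError('Key already seen - …')
        else
          let pr := parseB_collect rest [v]
          parseB_loop pr.2 (d.insert k (PySem.Str.join " " pr.1))
      | _ => none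
    else none                              -- raise GeneralError(kv)
  termination_by l => l.length
  decreasing_by
    have : (parseB_collect rest [v]).2.length ≤ rest.length := parseB_collect_snd_len rest [v]
    simp_all

def parse_as_key_value_alt (kv_parts : List String) : List (String × String) :=
  match parseB_loop kv_parts PySem.Dict.empty with
  | some d => d.items
  | none => []

-- ===== PRECONDITION & SPEC =====
-- first component of kv.split('=', 1): the characters before the first '='
def pvKeyOf (s : String) : String := String.ofList (s.toList.takeWhile (· ≠ '='))

-- Pre_ excludes exactly the inputs on which the Python A raises GeneralError: a first token
-- without '=' (A raises before any key exists) and a duplicate key among the '='-tokens.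
def Pre_parse_as_key_value (kv_parts : List String) : Prop :=
  (kv_parts ≠ [] → PySem.Str.isIn "=" (kv_parts.headD "") = true) ∧
  ((kv_parts.filter (fun s => PySem.Str.isIn "=" s)).map pvKeyOf).Nodup
instance (kv_parts : List String) : Decidable (Pre_parse_as_key_value kv_parts) := by
  unfold Pre_parse_as_key_value; infer_instance

def pvWitness_parse_as_key_value : List String := ["a=1", "x y", "b=2"]

def Spec_parse_as_key_value (kv_parts : List String) (out : List (String × String)) : Prop := out = parse_as_key_value_alt kv_parts
instance (kv_parts : List String) (out : List (String × String)) : Decidable (Spec_parse_as_key_value kv_parts out) := by unfold Spec_parse_as_key_value; infer_instance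

-- ===== CLAIM (what is proved, stated in full; the proofs are below) =====
def Claim_equal_parse_as_key_value : Prop := ∀ (kv_parts : List String), Dom_parse_as_key_value kv_parts → Pre_parse_as_key_value kv_parts → Spec_parse_as_key_value kv_parts (parse_as_key_value kv_parts)

-- ===== LEMMAS AND PROOFS =====

-- repeated insert at the same key collapses
theorem pv_ins_ins {κ ν : Type} [BEq κ] [LawfulBEq κ] (d : PySem.Dict κ ν) (k : κ) (a b : ν) :
    (d.insert k a).insert k b = d.insert k b := by
  apply PySem.Dict.ext
  cases h : d.contains k with
  | true =>
    rw [PySem.Dict.items_insert_of_contains _ _ (by simp [PySem.Dict.contains_insert_self]),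
        PySem.Dict.items_insert_of_contains _ _ h, PySem.Dict.items_insert_of_contains _ _ h,
        List.map_map]
    apply List.map_congr_left
    intro p _
    by_cases hp : p.1 == k <;> simp [hp]
  | false =>
    rw [PySem.Dict.items_insert_of_contains _ _ (by simp [PySem.Dict.contains_insert_self]),
        PySem.Dict.items_insert_of_not_contains _ _ h, PySem.Dict.items_insert_of_not_contains _ _ h,
        List.map_append]
    congr 1
    · rw [show d.items = List.map id d.items by simp]
      rw [List.map_map]
      apply List.map_congr_left
      intro p hp
      have hk : p.1 ≠ k := by
        intro e
        have hm : p.1 ∈ d.keys := PySem.Dict.mem_keys_of_mem_items _ hp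
        rw [e, ← PySem.Dict.contains_iff_mem_keys, h] at hm
        exact absurd hm (by simp)
      simp only [Function.comp, id_eq]
      simp [hk]
    · simp

theorem pv_join_single (g : String) : PySem.Str.join " " [g] = g := by
  simp [PySem.Str.join, PySem.Chars.join_singleton]

theorem pv_join_join (g c : String) (cs : List String) :
    PySem.Str.join " " (PySem.Str.join " " [g, c] :: cs) = PySem.Str.join " " (g :: c :: cs) := by
  cases cs with
  | nil => simp [PySem.Str.join, PySem.Chars.join_singleton, PySem.Chars.join_cons_cons]
  | cons x xs => simp [PySem.Str.join, PySem.Chars.join_singleton, PySem.Chars.join_cons_cons]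

theorem pv_find_ne_iff (kv : String) :
    (PySem.Str.find kv "=" ≠ -1) ↔ PySem.Str.isIn "=" kv = true := by
  rw [PySem.Str.find_ne_neg_one_iff, PySem.Str.isIn_iff_infix]

-- B's inner while loop is takeWhile/dropWhile on the no-'=' predicate
theorem pv_collect_spec : ∀ (l pieces : List String),
    parseB_collect l pieces =
      (pieces ++ l.takeWhile (fun s => !PySem.Str.isIn "=" s),
       l.dropWhile (fun s => !PySem.Str.isIn "=" s)) := by
  intro l
  induction l with
  | nil => intro pieces; simp [parseB_collect]
  | cons s rest ih =>
    intro pieces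
    cases hs : PySem.Str.isIn "=" s with
    | true =>
      simp only [PySem.Str.isIn_eq] at hs
      have hs' : PySem.Chars.isIn ['='] s.toList = true := hs
      simp [parseB_collect, hs']
    | false =>
      simp only [PySem.Str.isIn_eq] at hs
      have hs' : PySem.Chars.isIn ['='] s.toList = false := hs
      simp [parseB_collect, hs', ih]

theorem pv_head?_dropWhile {α : Type} (p : α → Bool) (l : List α) (a : α)
    (h : (l.dropWhile p).head? = some a) : p a = false := by
  induction l with
  | nil => simp [List.dropWhile] at h
  | cons x xs ih =>
    rw [List.dropWhile_cons] at h
    by_cases hx : p x = true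
    · rw [if_pos hx] at h; exact ih h
    · rw [if_neg hx] at h
      simp only [List.head?_cons, Option.some.injEq] at h
      subst h
      exact Bool.eq_false_iff.mpr hx

-- A's continuation run: incremental ' '.join updates collapse to a single join
theorem pv_absorbA : ∀ (cont : List String), (∀ c ∈ cont, PySem.Str.isIn "=" c = false) →
    ∀ (rest : List String) (d : PySem.Dict String String) (k g : String),
    parseA_loop (cont ++ rest) (d.insert k g) (some k) =
      parseA_loop rest (d.insert k (PySem.Str.join " " (g :: cont))) (some k) := by
  intro cont
  induction cont with
  | nil => intro _ rest d k g; rw [pv_join_single]; rfl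
  | cons c cs ih =>
    intro hc rest d k g
    have hcf : PySem.Str.isIn "=" c = false := hc c (by simp)
    have hcf' : PySem.Chars.isIn ['='] c.toList = false := by
      have h2 := hcf; simp only [PySem.Str.isIn_eq] at h2; exact h2
    have hfind : ¬ (PySem.Str.find c "=" ≠ -1) := fun h => by
      rw [pv_find_ne_iff] at h
      simp only [PySem.Str.isIn_eq] at h
      exact absurd (hcf'.symm.trans h) (by simp)
    rw [List.cons_append]
    show parseA_loop (c :: (cs ++ rest)) (d.insert k g) (some k) = _
    rw [parseA_loop]
    rw [if_neg hfind]
    simp only [PySem.Dict.getD_insert_self]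
    rw [pv_ins_ins]
    rw [ih (fun x hx => hc x (by simp [hx])) rest d k (PySem.Str.join " " [g, c])]
    rw [pv_join_join]

-- main loop equivalence: when the next token contains '=', A's loop and B's loop agree
theorem pv_eq_loop : ∀ (n : Nat) (l : List String) (d : PySem.Dict String String)
    (lk : Option String), l.length ≤ n →
    (∀ kv, l.head? = some kv → PySem.Str.isIn "=" kv = true) →
    parseA_loop l d lk = parseB_loop l d := by
  intro n
  induction n with
  | zero =>
    intro l d lk hl _
    have : l = [] := List.eq_nil_of_length_eq_zero (Nat.le_zero.mp hl)
    subst this; rw [parseA_loop, parseB_loop]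
  | succ n ih =>
    intro l d lk hl hhead
    cases l with
    | nil => rw [parseA_loop, parseB_loop]
    | cons kv rest =>
      have hin : PySem.Str.isIn "=" kv = true := hhead kv rfl
      have hfind : PySem.Str.find kv "=" ≠ -1 := (pv_find_ne_iff kv).mpr hin
      simp only [parseA_loop, parseB_loop]
      rw [if_pos hfind, if_pos hin]
      cases hsp : PySem.Str.splitMax? kv "=" 1 with
      | none => rfl
      | some ps =>
        rcases ps with _ | ⟨k, _ | ⟨v, _ | ⟨x, xs⟩⟩⟩
        · rfl
        · rfl
        · dsimp only
          cases hc : PySem.Dict.contains d k with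
          | true => simp
          | false =>
            simp only [Bool.false_eq_true, if_false]
            rw [pv_collect_spec rest [v]]
            simp only [List.singleton_append]
            have hsplit : rest = rest.takeWhile (fun s => !PySem.Str.isIn "=" s) ++
                rest.dropWhile (fun s => !PySem.Str.isIn "=" s) :=
              (List.takeWhile_append_dropWhile).symm
            conv_lhs => rw [hsplit]
            rw [pv_absorbA _ (fun c hcm => by
                  have := List.mem_takeWhile_imp hcm
                  simpa using this) _ d k v]
            have hlen : (rest.dropWhile (fun s => !PySem.Str.isIn "=" s)).length ≤ n := by
              have h1 := List.length_dropWhile_le (p := fun s => !PySem.Str.isIn "=" s) (l := rest)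
              have h2 : rest.length ≤ n := by simpa using Nat.le_of_succ_le_succ hl
              omega
            exact ih _ _ (some k) hlen (fun kv' hk' => by
              have := pv_head?_dropWhile _ _ _ hk'
              simpa using this)
        · rfl

-- ===== VERDICT (by name: the statement is the Claim_ definition above) =====
theorem parse_as_key_value_spec : Claim_equal_parse_as_key_value := by
  intro kv_parts _ hpre
  unfold Spec_parse_as_key_value parse_as_key_value parse_as_key_value_alt
  have hhead : ∀ kv, kv_parts.head? = some kv → PySem.Str.isIn "=" kv = true := by
    intro kv hk
    cases kv_parts with
    | nil => simp at hk
    | cons a l =>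
      simp at hk
      subst hk
      exact hpre.1 (by simp)
  rw [pv_eq_loop kv_parts.length kv_parts PySem.Dict.empty none le_rfl hhead]
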